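-- pv_equiv track=rewrite | github.com/openquantumhardware/qick | qick_lib/qick/drivers/pfb.py | ports2adc
-- ===== SOURCE A (Python) =====
-- def ports2adc(port0, port1):
--     # This function cheks the given ports correspond to the same ADC.
--     # The correspondance is (IQ mode):
--     #
--     # ADC0, tile 0.
--     # m00_axis: I
--     # m01_axis: Q
--     #
--     # ADC1, tile 0.
--     # m02_axis: I
--     # m03_axis: Q
--     #
--     # ADC0, tile 1.
--     # m10_axis: I
--     # m11_axis: Q
--     #
--     # ADC1, tile 1.
--     # m12_axis: I
--     # m13_axis: Q
--     #
--     # ADC0, tile 2.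
--     # m20_axis: I
--     # m21_axis: Q
--     #
--     # ADC1, tile 2.
--     # m22_axis: I
--     # m23_axis: Q
--     #
--     # ADC0, tile 3.
--     # m30_axis: I
--     # m31_axis: Q
--     #
--     # ADC1, tile 3.
--     # m32_axis: I
--     # m33_axis: Q
--     adc_dict = {
--         '0' :   {
--                     '0' : {'port 0' : 'm00', 'port 1' : 'm01'},
--                     '1' : {'port 0' : 'm02', 'port 1' : 'm03'},
--                 },
--         '1' :   {
--                     '0' : {'port 0' : 'm10', 'port 1' : 'm11'},
--                     '1' : {'port 0' : 'm12', 'port 1' : 'm13'},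
--                 },
--         '2' :   {
--                     '0' : {'port 0' : 'm20', 'port 1' : 'm21'},
--                     '1' : {'port 0' : 'm22', 'port 1' : 'm23'},
--                 },
--         '3' :   {
--                     '0' : {'port 0' : 'm30', 'port 1' : 'm31'},
--                     '1' : {'port 0' : 'm32', 'port 1' : 'm33'},
--                 },
--                 }
--
--     p0_n = port0[0:3]
--
--     # Find adc<->port.
--     # IQ on same port.
--     if port1 is None:
--         tile = p0_n[1]
--         adc  = p0_n[2]
--         return tile,adc
--
--     # IQ on different ports.
--     else:
--         p1_n = port1[0:3]
--
--         # IQ on different ports.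
--         for tile in adc_dict.keys():
--             for adc in adc_dict[tile].keys():
--                 # First possibility.
--                 if p0_n == adc_dict[tile][adc]['port 0']:
--                     if p1_n == adc_dict[tile][adc]['port 1']:
--                         return tile,adc
--                 # Second possibility.
--                 if p1_n == adc_dict[tile][adc]['port 0']:
--                     if p0_n == adc_dict[tile][adc]['port 1']:
--                         return tile,adc
--
--     # If I got here, adc not found.
--     raise RuntimeError("Cannot find correspondance with any ADC for ports %s,%s" % (port0,port1))
-- ===== SOURCE B (Python) =====
-- def ports2adc(port0, port1):
--     # Direct computation of the tile/adc mapping from the port name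
--     # characters, instead of scanning a nested dict of all 16 names.
--     if port1 is None:
--         p0_n = port0[0:3]
--         return p0_n[1], p0_n[2]
--     p0_n = port0[0:3]
--     p1_n = port1[0:3]
--     if len(p0_n) == 3 and len(p1_n) == 3:
--         m0, t0, c0 = p0_n
--         m1, t1, c1 = p1_n
--         if m0 == m1 == 'm' and t0 == t1 and t0 in '0123':
--             if {c0, c1} == {'0', '1'}:
--                 return t0, '0'
--             if {c0, c1} == {'2', '3'}:
--                 return t0, '1'
--     raise RuntimeError("Cannot find correspondance with any ADC for ports %s,%s" % (port0, port1))
-- ===== Notes on version B (the rewrite author's own statement) =====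
-- stated objective: simpler
-- what changed: B computes the tile/adc pair directly from the three name characters (prefix 'm', shared tile digit, I/Q character pair) instead of building a 16-entry nested dict and scanning it with two nested loops.
import Mathlib
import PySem

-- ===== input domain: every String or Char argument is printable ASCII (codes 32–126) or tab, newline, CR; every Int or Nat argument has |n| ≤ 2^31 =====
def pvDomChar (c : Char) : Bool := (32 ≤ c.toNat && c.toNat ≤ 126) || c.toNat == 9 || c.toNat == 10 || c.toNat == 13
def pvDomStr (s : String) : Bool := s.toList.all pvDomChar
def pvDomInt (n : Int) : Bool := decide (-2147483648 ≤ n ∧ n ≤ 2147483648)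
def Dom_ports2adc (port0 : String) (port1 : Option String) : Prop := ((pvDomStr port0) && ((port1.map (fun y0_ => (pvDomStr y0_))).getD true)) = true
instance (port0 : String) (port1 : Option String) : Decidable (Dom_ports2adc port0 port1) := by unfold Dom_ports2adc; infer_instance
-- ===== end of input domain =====

-- B computes the tile/adc pair directly from the three name characters instead of
-- scanning A's nested 16-entry dict; equivalence is about the return value (both
-- Pythons raise identically outside Pre_).

-- ===== PORT A =====
-- The nested dict literal of A, in insertion order: tile ↦ adc ↦ ('port 0', 'port 1') names.
def pvAdcDict : List (String × List (String × (List Char × List Char))) :=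
  [("0", [("0", ("m00".toList, "m01".toList)), ("1", ("m02".toList, "m03".toList))]),
   ("1", [("0", ("m10".toList, "m11".toList)), ("1", ("m12".toList, "m13".toList))]),
   ("2", [("0", ("m20".toList, "m21".toList)), ("1", ("m22".toList, "m23".toList))]),
   ("3", [("0", ("m30".toList, "m31".toList)), ("1", ("m32".toList, "m33".toList))])]

-- the inner 'for adc in adc_dict[tile].keys()' loop with its two 'return's
def pvScanAdc (p0n p1n : List Char) (tile : String) :
    List (String × (List Char × List Char)) → Option (String × String)
  | [] => none
  | (adc, (pa, pb)) :: rest =>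
    if p0n = pa ∧ p1n = pb then some (tile, adc)
    else if p1n = pa ∧ p0n = pb then some (tile, adc)
    else pvScanAdc p0n p1n tile rest

-- the outer 'for tile in adc_dict.keys()' loop
def pvScanTile (p0n p1n : List Char) :
    List (String × List (String × (List Char × List Char))) → Option (String × String)
  | [] => none
  | (tile, adcs) :: rest =>
    match pvScanAdc p0n p1n tile adcs with
    | some r => some r
    | none => pvScanTile p0n p1n rest

-- the two-port branch of A: scan the dict; 'none' is A's RuntimeError (excluded by Pre_)
def pvACore (p0n p1n : List Char) : String × String :=
  match pvScanTile p0n p1n pvAdcDict with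
  | some r => r
  | none => ("", "")

def ports2adc (port0 : String) (port1 : Option String) : String × String :=
  let p0n := PySem.List.slice port0.toList (some 0) (some 3)
  match port1 with
  | none =>
    -- tile = p0_n[1]; adc = p0_n[2]  (IndexError when out of range: excluded by Pre_)
    let tile := match PySem.List.pyGet? p0n 1 with | some c => String.ofList [c] | none => ""
    let adc  := match PySem.List.pyGet? p0n 2 with | some c => String.ofList [c] | none => ""
    (tile, adc)
  | some port1 =>
    let p1n := PySem.List.slice port1.toList (some 0) (some 3)
    pvACore p0n p1n

-- ===== PORT B =====
-- the two-port branch of B: direct character checks; ("","") is B's RuntimeError (excluded by Pre_)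
def pvAltCore (p0n p1n : List Char) : String × String :=
  match p0n, p1n with
  | [m0, t0, c0], [m1, t1, c1] =>
    if m0 = 'm' ∧ m1 = 'm' ∧ t0 = t1 ∧ (t0 = '0' ∨ t0 = '1' ∨ t0 = '2' ∨ t0 = '3') then
      if (c0 = '0' ∧ c1 = '1') ∨ (c0 = '1' ∧ c1 = '0') then (String.ofList [t0], "0")
      else if (c0 = '2' ∧ c1 = '3') ∨ (c0 = '3' ∧ c1 = '2') then (String.ofList [t0], "1")
      else ("", "")
    else ("", "")
  | _, _ => ("", "")

def ports2adc_alt (port0 : String) (port1 : Option String) : String × String :=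
  match port1 with
  | none =>
    let p0n := PySem.List.slice port0.toList (some 0) (some 3)
    let tile := match PySem.List.pyGet? p0n 1 with | some c => String.ofList [c] | none => ""
    let adc  := match PySem.List.pyGet? p0n 2 with | some c => String.ofList [c] | none => ""
    (tile, adc)
  | some port1 =>
    pvAltCore (PySem.List.slice port0.toList (some 0) (some 3))
              (PySem.List.slice port1.toList (some 0) (some 3))

-- ===== PRECONDITION & SPEC =====
-- The 32 (port0[0:3], port1[0:3]) pairs on which A's dict scan finds an ADC.
def pvValidPairs : List (List Char × List Char) :=
  [("m00".toList, "m01".toList), ("m01".toList, "m00".toList),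
   ("m02".toList, "m03".toList), ("m03".toList, "m02".toList),
   ("m10".toList, "m11".toList), ("m11".toList, "m10".toList),
   ("m12".toList, "m13".toList), ("m13".toList, "m12".toList),
   ("m20".toList, "m21".toList), ("m21".toList, "m20".toList),
   ("m22".toList, "m23".toList), ("m23".toList, "m22".toList),
   ("m30".toList, "m31".toList), ("m31".toList, "m30".toList),
   ("m32".toList, "m33".toList), ("m33".toList, "m32".toList)]

-- Pre_ is exactly where A returns: one port needs length ≥ 3 (else IndexError);
-- two ports must be a recognised I/Q pair (else A raises RuntimeError).
def Pre_ports2adc (port0 : String) (port1 : Option String) : Prop :=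
  match port1 with
  | none => 3 ≤ port0.toList.length
  | some p1 => (PySem.List.slice port0.toList (some 0) (some 3),
                PySem.List.slice p1.toList (some 0) (some 3)) ∈ pvValidPairs

instance (port0 : String) (port1 : Option String) : Decidable (Pre_ports2adc port0 port1) := by
  unfold Pre_ports2adc; cases port1 <;> infer_instance

def pvWitness_ports2adc : String × Option String := ("m23_axis", some "m22_axis")

def Spec_ports2adc (port0 : String) (port1 : Option String) (out : String × String) : Prop := out = ports2adc_alt port0 port1
instance (port0 : String) (port1 : Option String) (out : String × String) : Decidable (Spec_ports2adc port0 port1 out) := by unfold Spec_ports2adc; infer_instance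

-- ===== CLAIM (what is proved, stated in full; the proofs are below) =====
def Claim_equal_ports2adc : Prop := ∀ (port0 : String) (port1 : Option String), Dom_ports2adc port0 port1 → Pre_ports2adc port0 port1 → Spec_ports2adc port0 port1 (ports2adc port0 port1)

-- ===== LEMMAS AND PROOFS =====
theorem pvCore_eq (a b : List Char) (h : (a, b) ∈ pvValidPairs) : pvACore a b = pvAltCore a b := by
  fin_cases h <;> decide

-- ===== VERDICT (by name: the statement is the Claim_ definition above) =====
theorem ports2adc_spec : Claim_equal_ports2adc := by
  intro port0 port1 _ hpre
  unfold Spec_ports2adc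
  cases port1 with
  | none => rfl
  | some p1 =>
    simp only [ports2adc, ports2adc_alt]
    exact pvCore_eq _ _ hpre
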